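-- pv_equiv track=rewrite | github.com/matheusramosbarbosa/atividades_ip_2024 | lista_4/lista4_ativ6.py | remover_pokemon
-- ===== SOURCE A (Python) =====
-- def remover_pokemon(lista, quantidade):
--     contador = 0
--     i = len(lista) - 1
--     while i >= 0 and contador < quantidade:
--         if lista[i] == '1':
--             lista[i] = '0'
--             contador += 1
--         i -= 1
--
--     # Remover boxes vazias sem usar break ou continue
--     remover_zeros = True
--     while len(lista) > 30 and remover_zeros:
--         box_vazio = True
--         j = len(lista) - 30
--         while j < len(lista) and box_vazio:
--             if lista[j] != '0':
--                 box_vazio = False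
--                 remover_zeros = False  # Altera a variável de controle para sair do loop externo
--             j += 1
--         if box_vazio:
--             lista = lista[:-30]
--         else:
--             remover_zeros = False
--
--     return lista
-- ===== SOURCE B (Python) =====
-- def remover_pokemon(lista, quantidade):
--     contador = 0
--     for i in range(len(lista) - 1, -1, -1):
--         if contador >= quantidade:
--             break
--         if lista[i] == '1':
--             lista[i] = '0'
--             contador += 1
--     # locate last non-'0' entry once
--     p = -1
--     for k in range(len(lista) - 1, -1, -1):
--         if lista[k] != '0':
--             p = k
--             break
--     # drop whole trailing all-zero 30-boxes arithmetically
--     n = len(lista)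
--     while n > 30 and n - 30 > p:
--         n -= 30
--     return lista[:n]
-- ===== Notes on version B (the rewrite author's own statement) =====
-- stated objective: alternative
-- what changed: Replaces A's repeated scan-then-slice box-removal loop (flag variables, rescanning and copying the list each round) by one backward scan locating the last non-'0' entry plus an arithmetic countdown of the length in steps of 30, returning a single slice; the in-place flip pass is kept.
import Mathlib
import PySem

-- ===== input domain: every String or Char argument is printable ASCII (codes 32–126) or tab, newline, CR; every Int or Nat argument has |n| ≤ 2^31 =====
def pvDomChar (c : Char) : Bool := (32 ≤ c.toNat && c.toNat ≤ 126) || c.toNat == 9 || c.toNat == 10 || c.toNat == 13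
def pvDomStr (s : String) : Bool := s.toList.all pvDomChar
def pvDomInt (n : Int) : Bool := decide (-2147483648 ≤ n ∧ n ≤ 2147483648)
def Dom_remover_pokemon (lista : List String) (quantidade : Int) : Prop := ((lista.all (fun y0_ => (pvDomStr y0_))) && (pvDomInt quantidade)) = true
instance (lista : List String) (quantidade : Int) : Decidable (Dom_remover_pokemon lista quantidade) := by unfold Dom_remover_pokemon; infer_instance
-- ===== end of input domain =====

-- B differs from A only in how the trailing all-zero boxes are removed; equivalence is about the
-- RETURN value (both Pythons also mutate `lista` in place identically during the flip pass).

-- ===== PORT A =====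
-- inner while loop: scan box lista[j:] stopping at the first non-'0' (box_vazio/remover_zeros flags
-- are modelled by returning the Bool box_vazio)
def pvBoxScanA (lista : List String) (j : Int) : Bool :=
  if h : j < (lista.length : Int) then
    if PySem.List.pyGet? lista j ≠ some "0" then false
    else pvBoxScanA lista (j + 1)
  else true
termination_by ((lista.length : Int) - j).toNat
decreasing_by omega

-- first while loop: flip trailing '1's to '0' walking i downward (lista[i] = '0' is pySetD: i is in range)
def pvFlipA (lista : List String) (i contador quantidade : Int) : List String :=
  if h : 0 ≤ i ∧ contador < quantidade then
    if PySem.List.pyGet? lista i = some "1" then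
      pvFlipA (PySem.List.pySetD lista i "0") (i - 1) (contador + 1) quantidade
    else
      pvFlipA lista (i - 1) contador quantidade
  else lista
termination_by (i + 1).toNat
decreasing_by all_goals omega

-- outer while loop: drop lista[:-30] while the last box is all '0'
def pvTrimA (lista : List String) : List String :=
  if h : 30 < (lista.length : Int) then
    if pvBoxScanA lista ((lista.length : Int) - 30) then
      pvTrimA (PySem.List.slice lista none (some (-30)))
    else lista
  else lista
termination_by lista.length
decreasing_by
  rw [PySem.List.slice_to_neg_ofNat lista 30 (by omega)]; simp; omega

def remover_pokemon (lista : List String) (quantidade : Int) : List String :=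
  pvTrimA (pvFlipA lista ((lista.length : Int) - 1) 0 quantidade)

-- ===== PORT B =====
-- range(len-1, -1, -1) as a list of Int indices
def pvDescIdx (n : Nat) : List Int := (List.range n).reverse.map Int.ofNat

-- for-loop flip with break once contador >= quantidade
def pvFlipB (idxs : List Int) (lista : List String) (contador quantidade : Int) : List String :=
  match idxs with
  | [] => lista
  | i :: rest =>
    if quantidade ≤ contador then lista
    else if PySem.List.pyGet? lista i = some "1" then
      pvFlipB rest (PySem.List.pySetD lista i "0") (contador + 1) quantidade
    else pvFlipB rest lista contador quantidade

-- for-loop with break: index of the last entry ≠ '0', -1 if none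
def pvLastNZ (idxs : List Int) (lista : List String) : Int :=
  match idxs with
  | [] => -1
  | k :: rest => if PySem.List.pyGet? lista k ≠ some "0" then k else pvLastNZ rest lista

-- while n > 30 and n - 30 > p: n -= 30
def pvShrink (n p : Int) : Int :=
  if h : 30 < n ∧ p < n - 30 then pvShrink (n - 30) p else n
termination_by n.toNat
decreasing_by omega

def remover_pokemon_alt (lista : List String) (quantidade : Int) : List String :=
  let idxs := pvDescIdx lista.length
  let lista2 := pvFlipB idxs lista 0 quantidade
  let p := pvLastNZ idxs lista2
  let n := pvShrink (lista2.length : Int) p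
  PySem.List.slice lista2 none (some n)

-- ===== PRECONDITION & SPEC =====
def Spec_remover_pokemon (lista : List String) (quantidade : Int) (out : List String) : Prop := out = remover_pokemon_alt lista quantidade
instance (lista : List String) (quantidade : Int) (out : List String) : Decidable (Spec_remover_pokemon lista quantidade out) := by unfold Spec_remover_pokemon; infer_instance

-- ===== CLAIM (what is proved, stated in full; the proofs are below) =====
def Claim_equal_remover_pokemon : Prop := ∀ (lista : List String) (quantidade : Int), Dom_remover_pokemon lista quantidade → Spec_remover_pokemon lista quantidade (remover_pokemon lista quantidade)

-- ===== LEMMAS AND PROOFS =====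

lemma pvFlipA_neg (lista : List String) (i c q : Int) (hi : i < 0) :
    pvFlipA lista i c q = lista := by
  unfold pvFlipA; rw [dif_neg]; omega

lemma pvDescIdx_succ (n : Nat) :
    pvDescIdx (n + 1) = (n : Int) :: pvDescIdx n := by
  simp [pvDescIdx, List.range_succ]

lemma flipB_cons (i : Int) (rest : List Int) (lista : List String) (c q : Int) :
    pvFlipB (i :: rest) lista c q =
      if q ≤ c then lista
      else if PySem.List.pyGet? lista i = some "1" then
        pvFlipB rest (PySem.List.pySetD lista i "0") (c + 1) q
      else pvFlipB rest lista c q := rfl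

lemma flip_eq : ∀ (n : Nat) (lista : List String) (c q : Int),
    pvFlipA lista ((n : Int) - 1) c q = pvFlipB (pvDescIdx n) lista c q := by
  intro n
  induction n with
  | zero => intro lista c q; simp [pvDescIdx, pvFlipB, pvFlipA_neg]
  | succ k ih =>
    intro lista c q
    rw [pvDescIdx_succ, flipB_cons,
      show (((k + 1 : Nat) : Int) - 1) = (k : Int) from by push_cast; ring]
    unfold pvFlipA
    by_cases hc : c < q
    · rw [dif_pos ⟨by omega, hc⟩, if_neg (not_le.mpr hc)]
      by_cases hg : PySem.List.pyGet? lista ((k : Nat) : Int) = some "1"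
      · rw [if_pos hg, if_pos hg]; exact ih _ _ _
      · rw [if_neg hg, if_neg hg]; exact ih _ _ _
    · rw [dif_neg (by omega), if_pos (not_lt.mp hc)]

lemma flipB_length : ∀ (idxs : List Int) (lista : List String) (c q : Int),
    (pvFlipB idxs lista c q).length = lista.length := by
  intro idxs
  induction idxs with
  | nil => intro lista c q; simp [pvFlipB]
  | cons i rest ih =>
    intro lista c q
    unfold pvFlipB
    split
    · rfl
    · split <;> simp [ih, PySem.List.length_pySetD]

lemma shrink_le (n p : Int) : pvShrink n p ≤ n := by
  unfold pvShrink
  split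
  · have := shrink_le (n - 30) p; omega
  · omega
termination_by n.toNat
decreasing_by omega

lemma shrink_pos (n p : Int) (hn : 0 < n) : 0 < pvShrink n p := by
  unfold pvShrink
  split
  · exact shrink_pos (n - 30) p (by omega)
  · omega
termination_by n.toNat
decreasing_by omega

lemma shrink_stop (n p : Int) (h : ¬ (30 < n ∧ p < n - 30)) : pvShrink n p = n := by
  unfold pvShrink; rw [dif_neg h]

lemma lastNZ_cons (k : Int) (rest : List Int) (lista : List String) :
    pvLastNZ (k :: rest) lista =
      if PySem.List.pyGet? lista k ≠ some "0" then k else pvLastNZ rest lista := rfl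

-- bounds of pvLastNZ over pvDescIdx n
lemma lastNZ_bounds : ∀ (n : Nat) (lista : List String),
    -1 ≤ pvLastNZ (pvDescIdx n) lista ∧ pvLastNZ (pvDescIdx n) lista < n := by
  intro n
  induction n with
  | zero => intro lista; simp [pvDescIdx, pvLastNZ]
  | succ k ih =>
    intro lista
    rw [pvDescIdx_succ, lastNZ_cons]
    split
    · constructor <;> omega
    · have := ih lista; constructor <;> omega

-- the entry at pvLastNZ (if any) is not '0'
lemma lastNZ_mem : ∀ (n : Nat) (lista : List String),
    0 ≤ pvLastNZ (pvDescIdx n) lista →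
    PySem.List.pyGet? lista (pvLastNZ (pvDescIdx n) lista) ≠ some "0" := by
  intro n
  induction n with
  | zero => intro lista h; simp [pvDescIdx, pvLastNZ] at h
  | succ k ih =>
    intro lista h
    rw [pvDescIdx_succ, lastNZ_cons] at h ⊢
    by_cases hk : PySem.List.pyGet? lista (k : Int) ≠ some "0"
    · rw [if_pos hk]; exact hk
    · rw [if_neg hk] at h ⊢; exact ih lista h

-- every index strictly above pvLastNZ and below n holds '0'
lemma lastNZ_zero_above : ∀ (n : Nat) (lista : List String) (j : Int),
    pvLastNZ (pvDescIdx n) lista < j → j < n →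
    PySem.List.pyGet? lista j = some "0" := by
  intro n
  induction n with
  | zero =>
    intro lista j h1 h2
    have h1' : (-1 : Int) < j := by simpa [pvDescIdx, pvLastNZ] using h1
    exact absurd h2 (by simpa using by omega)
  | succ k ih =>
    intro lista j h1 h2
    rw [pvDescIdx_succ, lastNZ_cons] at h1
    by_cases hk : PySem.List.pyGet? lista (k : Int) ≠ some "0"
    · rw [if_pos hk] at h1
      exact absurd h2 (by omega)
    · rw [if_neg hk] at h1
      by_cases hj : j = (k : Int)
      · subst hj; simpa using hk
      · exact ih lista j h1 (by omega)

-- pvLastNZ ignores entries known to be '0' between a and b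
lemma lastNZ_drop_zeros : ∀ (b a : Nat) (lista : List String), a ≤ b →
    (∀ j : Int, (a : Int) ≤ j → j < b → PySem.List.pyGet? lista j = some "0") →
    pvLastNZ (pvDescIdx b) lista = pvLastNZ (pvDescIdx a) lista := by
  intro b
  induction b with
  | zero => intro a lista ha _; interval_cases a; rfl
  | succ k ih =>
    intro a lista ha hz
    by_cases hak : a = k + 1
    · subst hak; rfl
    · rw [pvDescIdx_succ, lastNZ_cons]
      rw [if_neg (by simp [hz (k : Int) (by omega) (by omega)])]
      exact ih a lista (by omega) (fun j h1 h2 => hz j h1 (by omega))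

-- pvLastNZ over pvDescIdx m only looks below m, so a take m is invisible
lemma lastNZ_take : ∀ (m : Nat) (lista : List String),
    pvLastNZ (pvDescIdx m) (lista.take m) = pvLastNZ (pvDescIdx m) lista := by
  intro m
  induction m with
  | zero => intro lista; rfl
  | succ k ih =>
    intro lista
    rw [pvDescIdx_succ, lastNZ_cons, lastNZ_cons]
    have hget : PySem.List.pyGet? (lista.take (k + 1)) (k : Int)
        = PySem.List.pyGet? lista (k : Int) := by
      simp [List.getElem?_take_of_lt (Nat.lt_succ_self k)]
    rw [hget]
    split
    · rfl
    · have htake : (lista.take (k + 1)).take k = lista.take k := by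
        rw [List.take_take]; congr 1; omega
      have e1 := ih (lista.take (k + 1))
      rw [htake] at e1
      rw [← e1]
      exact ih lista

-- characterisation of the inner box scan
lemma boxScan_true_iff (lista : List String) (j : Int) :
    pvBoxScanA lista j = true ↔
      ∀ m : Int, j ≤ m → m < lista.length → PySem.List.pyGet? lista m = some "0" := by
  unfold pvBoxScanA
  split
  · rename_i h
    split
    · rename_i hne
      exact iff_of_false (by simp) (fun hall => hne (hall j le_rfl h))
    · rename_i hz
      rw [boxScan_true_iff lista (j + 1)]
      constructor
      · intro hall m hm1 hm2
        by_cases hj : m = j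
        · subst hj; simpa using hz
        · exact hall m (by omega) hm2
      · intro hall m hm1 hm2; exact hall m (by omega) hm2
  · rename_i h
    exact iff_of_true rfl (fun m hm1 hm2 => absurd (by omega : j < (lista.length : Int)) h)
termination_by ((lista.length : Int) - j).toNat
decreasing_by omega

-- the main trim equivalence
lemma trim_eq (lista : List String) :
    pvTrimA lista =
      PySem.List.slice lista none
        (some (pvShrink (lista.length : Int) (pvLastNZ (pvDescIdx lista.length) lista))) := by
  unfold pvTrimA
  split
  · rename_i h30
    split
    · rename_i hscan
      -- last box all '0' ⇒ p < n - 30, both sides drop a box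
      have hall := (boxScan_true_iff lista ((lista.length : Int) - 30)).mp hscan
      have hb := lastNZ_bounds lista.length lista
      have hplt : pvLastNZ (pvDescIdx lista.length) lista < (lista.length : Int) - 30 := by
        by_contra hge
        exact lastNZ_mem lista.length lista (by omega) (hall _ (by omega) (by omega))
      have hslice : PySem.List.slice lista none (some (-30)) = lista.take (lista.length - 30) :=
        PySem.List.slice_to_neg_ofNat lista 30 (by omega)
      rw [hslice, trim_eq (lista.take (lista.length - 30))]
      have hlen' : (lista.take (lista.length - 30)).length = lista.length - 30 := by
        rw [List.length_take]; omega
      rw [hlen']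
      have hcast : ((lista.length - 30 : Nat) : Int) = (lista.length : Int) - 30 := by omega
      have hpe : pvLastNZ (pvDescIdx (lista.length - 30)) (lista.take (lista.length - 30))
          = pvLastNZ (pvDescIdx lista.length) lista := by
        rw [lastNZ_take]
        exact (lastNZ_drop_zeros lista.length (lista.length - 30) lista (by omega)
          (fun j h1 h2 => hall j (by omega) (by omega))).symm
      rw [hpe]
      have hsh : pvShrink ((lista.length - 30 : Nat) : Int) (pvLastNZ (pvDescIdx lista.length) lista)
          = pvShrink (lista.length : Int) (pvLastNZ (pvDescIdx lista.length) lista) := by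
        conv_rhs => unfold pvShrink
        rw [dif_pos ⟨by omega, hplt⟩, hcast]
      rw [hsh]
      have hr1 : 0 < pvShrink (lista.length : Int) (pvLastNZ (pvDescIdx lista.length) lista) :=
        shrink_pos _ _ (by omega)
      have hr2 : pvShrink (lista.length : Int) (pvLastNZ (pvDescIdx lista.length) lista)
          ≤ (lista.length : Int) - 30 := by
        have := shrink_le ((lista.length - 30 : Nat) : Int)
          (pvLastNZ (pvDescIdx lista.length) lista)
        omega
      rw [PySem.List.slice_to _ (by omega), PySem.List.slice_to _ (by omega), List.take_take]
      congr 1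
      omega
    · rename_i hscan
      -- a non-'0' in the last box ⇒ p ≥ n - 30, pvShrink stops immediately
      have hb := lastNZ_bounds lista.length lista
      have hpge : (lista.length : Int) - 30 ≤ pvLastNZ (pvDescIdx lista.length) lista := by
        by_contra hlt
        exact hscan ((boxScan_true_iff lista _).mpr
          (fun m hm1 hm2 => lastNZ_zero_above lista.length lista m (by omega) (by omega)))
      rw [shrink_stop _ _ (by omega), PySem.List.slice_to _ (by omega)]
      simp
  · rename_i h30
    have hb := lastNZ_bounds lista.length lista
    rw [shrink_stop _ _ (by omega), PySem.List.slice_to _ (by omega)]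
    simp
termination_by lista.length
decreasing_by simp; omega

-- ===== VERDICT (by name: the statement is the Claim_ definition above) =====
theorem remover_pokemon_spec : Claim_equal_remover_pokemon := by
  intro lista quantidade _
  unfold Spec_remover_pokemon remover_pokemon remover_pokemon_alt
  rw [flip_eq lista.length lista 0 quantidade, trim_eq]
  simp only [flipB_length]
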